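-- pv_equiv track=rewrite | github.com/temidayo1409/MyHackerrankTasks | Algorithms/MigratoryBirds.py | migratoryBirds
-- ===== SOURCE A (Python) =====
-- def migratoryBirds(arr):
--     # Write your code here
--     freq = {}
--     list_id = []
--     for i in arr:
--         if (i in freq):
--             freq[i] += 1
--         else:
--             freq[i] = 1
--
--     for key, value in freq.items():
--         if(value == max(freq.values())):
--             list_id.append(key)
--     return min(list_id)
-- ===== SOURCE B (Python) =====
-- def migratoryBirds(arr):
--     return min(set(arr), key=lambda x: (-arr.count(x), x))
-- ===== Notes on version B (the rewrite author's own statement) =====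
-- stated objective: idiomatic
-- what changed: A builds a frequency dict, then collects all max-frequency keys in a second pass (recomputing max(freq.values()) inside the loop) and takes their min; B is a single idiomatic min over set(arr) with the key (-arr.count(x), x), so no dict and no candidate list are built.
-- outside the precondition, e.g. on migratoryBirds([]): A raises ValueError, B raises ValueError
import Mathlib
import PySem

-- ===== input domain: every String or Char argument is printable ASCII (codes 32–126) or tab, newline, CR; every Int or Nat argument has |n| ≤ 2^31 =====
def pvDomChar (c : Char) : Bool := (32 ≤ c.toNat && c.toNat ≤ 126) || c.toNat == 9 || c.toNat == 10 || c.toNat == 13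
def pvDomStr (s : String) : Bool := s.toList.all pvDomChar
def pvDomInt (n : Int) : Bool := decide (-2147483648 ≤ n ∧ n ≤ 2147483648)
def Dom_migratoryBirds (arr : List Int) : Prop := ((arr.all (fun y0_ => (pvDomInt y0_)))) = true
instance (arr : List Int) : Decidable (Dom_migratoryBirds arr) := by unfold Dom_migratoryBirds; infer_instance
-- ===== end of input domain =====

-- B replaces A's frequency dict + two extra passes by one idiomatic min-with-key over the distinct
-- elements (objective: idiomatic; not claimed faster). A and B both raise ValueError on [], excluded by Pre_.


-- ===== PORT A =====
-- freq: 'if i in freq: freq[i] += 1 else: freq[i] = 1'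
def pvFreqA (arr : List Int) : PySem.Dict Int Int :=
  arr.foldl (fun d i =>
      if d.contains i then d.insert i ((d.get? i).getD 0 + 1)
      else d.insert i 1)
    PySem.Dict.empty
-- 'for key, value in freq.items(): if value == max(freq.values()): list_id.append(key)'
-- (max([]) raises; the none branch is dead code since the loop body only runs when freq is nonempty)
def pvListIdA (arr : List Int) : List Int :=
  (pvFreqA arr).items.foldl (fun acc kv =>
      match PySem.List.max? (pvFreqA arr).values (fun v => v) with
      | some m => if kv.2 = m then acc ++ [kv.1] else acc
      | none => acc)
    []
-- 'return min(list_id)'; min([]) raises ValueError (arr = [], excluded by Pre_), getD 0 is unreached there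
def migratoryBirds (arr : List Int) : Int :=
  (PySem.List.min? (pvListIdA arr) (fun x => x)).getD 0

-- ===== PORT B =====
-- 'return min(set(arr), key=lambda x: (-arr.count(x), x))'; min of an empty set raises (excluded by Pre_).
-- The tuple key is ported with min2? (Python's lexicographic tuple order); it is injective on the set,
-- so the result does not depend on the set's iteration order.
def migratoryBirds_alt (arr : List Int) : Int :=
  (PySem.List.min2? (PySem.Set.ofList arr)
      (fun x => -((arr.count x : Int))) (fun x => x)).getD 0

-- ===== PRECONDITION & SPEC =====
-- Pre_ excludes only arr = [], where A's min([]) raises ValueError (and B's min(set([])) raises too).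
def Pre_migratoryBirds (arr : List Int) : Prop := arr ≠ []
instance (arr : List Int) : Decidable (Pre_migratoryBirds arr) := by unfold Pre_migratoryBirds; infer_instance
def pvWitness_migratoryBirds : List Int := [1, 2, 2]
def Spec_migratoryBirds (arr : List Int) (out : Int) : Prop := out = migratoryBirds_alt arr
instance (arr : List Int) (out : Int) : Decidable (Spec_migratoryBirds arr out) := by unfold Spec_migratoryBirds; infer_instance

-- ===== CLAIM (what is proved, stated in full; the proofs are below) =====
def Claim_equal_migratoryBirds : Prop := ∀ (arr : List Int), Dom_migratoryBirds arr → Pre_migratoryBirds arr → Spec_migratoryBirds arr (migratoryBirds arr)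

-- ===== LEMMAS AND PROOFS =====

-- A's counting loop step coincides with Counter's step
theorem pvFreqA_eq_counter (arr : List Int) : pvFreqA arr = PySem.Dict.counter arr := by
  rw [pvFreqA, PySem.Dict.counter_eq_foldl]
  apply PySem.List.foldl_congr_mem
  intro d i _
  by_cases h : d.contains i
  · simp [PySem.Dict.modify, PySem.Dict.getD_eq_get?_getD, h]
  · rw [if_neg h]
    unfold PySem.Dict.modify
    rw [PySem.Dict.getD_of_not_contains d 0 (eq_false_of_ne_true h)]
    norm_num

-- the fold step of min2? with key (-(c x), x), specialised to Int
def pvMStep (c : Int → Int) (acc : Option Int) (x : Int) : Option Int :=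
  match acc with
  | none => some x
  | some m =>
    if (decide ((-(c x)) < (-(c m))) || !decide ((-(c m)) < (-(c x))) && decide (x < m)) = true
    then some x else some m

theorem pvMin2_eq_foldl (c : Int → Int) (S : List Int) :
    PySem.List.min2? S (fun x => -(c x)) (fun x => x) = S.foldl (pvMStep c) none := by
  unfold PySem.List.min2? pvMStep
  congr 1
  funext acc x
  cases acc <;> simp

theorem pvMStep_some (c : Int → Int) : ∀ (S : List Int) (a : Int), ∃ r, S.foldl (pvMStep c) (some a) = some r := by
  intro S
  induction S with
  | nil => exact fun a => ⟨a, rfl⟩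
  | cons x S ih =>
    intro a
    rw [List.foldl_cons]
    by_cases h : (decide ((-(c x)) < (-(c a))) || !decide ((-(c a)) < (-(c x))) && decide (x < a)) = true
    · rw [show pvMStep c (some a) x = some x from by simp only [pvMStep]; rw [if_pos h]]
      exact ih x
    · rw [show pvMStep c (some a) x = some a from by simp only [pvMStep]; rw [if_neg h]]
      exact ih a

-- invariant of the running minimum: the result beats every scanned element under (-count, id)
theorem pvMStep_inv (c : Int → Int) : ∀ (S : List Int) (a r : Int),
    S.foldl (pvMStep c) (some a) = some r →
    (r = a ∨ r ∈ S) ∧ (c a ≤ c r ∧ (c a = c r → r ≤ a)) ∧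
      ∀ y ∈ S, c y ≤ c r ∧ (c y = c r → r ≤ y) := by
  intro S
  induction S with
  | nil =>
    intro a r h
    simp only [List.foldl_nil, Option.some.injEq] at h
    subst h
    exact ⟨Or.inl rfl, ⟨le_refl _, fun _ => le_refl _⟩, by simp⟩
  | cons x S ih =>
    intro a r h
    rw [List.foldl_cons] at h
    by_cases hc : (decide ((-(c x)) < (-(c a))) || !decide ((-(c a)) < (-(c x))) && decide (x < a)) = true
    · -- running value replaced by x
      rw [show pvMStep c (some a) x = some x from by simp only [pvMStep]; rw [if_pos hc]] at h
      obtain ⟨hmem, ⟨hxr, hxr'⟩, hall⟩ := ih x r h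
      simp only [Bool.or_eq_true, Bool.and_eq_true, Bool.not_eq_true', decide_eq_true_eq,
        decide_eq_false_iff_not] at hc
      refine ⟨by rcases hmem with h1 | h1 <;> simp [h1], ⟨by omega, ?_⟩, ?_⟩
      · intro hca
        rcases hc with hc | ⟨hc1, hc2⟩ <;> [omega; exact le_trans (hxr' (by omega)) (le_of_lt hc2)]
      · intro y hy
        rcases List.mem_cons.mp hy with h1 | h1
        · subst h1; exact ⟨hxr, hxr'⟩
        · exact hall y h1
    · -- running value kept as a
      rw [show pvMStep c (some a) x = some a from by simp only [pvMStep]; rw [if_neg hc]] at h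
      obtain ⟨hmem, ⟨har, har'⟩, hall⟩ := ih a r h
      simp only [Bool.or_eq_true, Bool.and_eq_true, Bool.not_eq_true', decide_eq_true_eq,
        decide_eq_false_iff_not, not_or, not_and, not_lt] at hc
      refine ⟨by rcases hmem with h1 | h1 <;> simp [h1], ⟨har, har'⟩, ?_⟩
      intro y hy
      rcases List.mem_cons.mp hy with h1 | h1
      · subst h1
        obtain ⟨hc1, hc2⟩ := hc
        refine ⟨by omega, fun hcy => ?_⟩
        have hax : a ≤ y := hc2 (by omega)
        exact le_trans (har' (by omega)) hax
      · exact hall y h1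

theorem migratoryBirds_spec' (arr : List Int) (hpre : arr ≠ []) :
    migratoryBirds arr = migratoryBirds_alt arr := by
  set c : Int → Int := fun k => ((arr.count k : Int)) with hc
  set S : List Int := PySem.Set.ofList arr with hS
  -- S is nonempty
  obtain ⟨x0, t0, hx0⟩ := List.exists_cons_of_ne_nil hpre
  have hx0S : x0 ∈ S := (PySem.Set.mem_ofList arr x0).mpr (by simp [hx0])
  have hSne : S ≠ [] := fun h => by simp [h] at hx0S
  -- A's dict is Counter(arr)
  have hitems : (pvFreqA arr).items = S.map (fun k => (k, c k)) := by
    rw [pvFreqA_eq_counter, PySem.Dict.items_counter]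
  have hvalues : (pvFreqA arr).values = S.map c := by
    show (pvFreqA arr).items.map (·.2) = S.map c
    rw [hitems, List.map_map]
    simp [Function.comp_def]
  -- the maximum frequency m
  obtain ⟨m, hm⟩ : ∃ m, PySem.List.max? (pvFreqA arr).values (fun v => v) = some m := by
    cases hmx : PySem.List.max? (pvFreqA arr).values (fun v => v) with
    | none =>
      rw [PySem.List.max?_eq_none_iff, hvalues, List.map_eq_nil_iff] at hmx
      exact absurd hmx hSne
    | some m => exact ⟨m, rfl⟩
  have hmmem : m ∈ S.map c := hvalues ▸ PySem.List.max?_mem hm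
  have hmmax : ∀ y ∈ S, c y ≤ m := fun y hy =>
    PySem.List.max?_isMax hm (c y) (hvalues ▸ List.mem_map_of_mem hy)
  obtain ⟨k0, hk0S, hk0⟩ := List.mem_map.mp hmmem
  -- A's list_id is the distinct elements whose count is m
  have hlist : pvListIdA arr = S.filter (fun k => decide (c k = m)) := by
    rw [pvListIdA, hitems]
    simp only [hm]
    show (S.map (fun k => (k, c k))).foldl
        (fun acc (kv : Int × Int) => if kv.2 = m then acc ++ [kv.1] else acc) [] = _
    rw [PySem.List.foldl_append_ite (fun kv : Int × Int => kv.2 = m) (fun kv : Int × Int => kv.1),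
      List.nil_append, List.filter_map, List.map_map]
    simp [Function.comp_def]
  -- A's result r1
  have hLne : S.filter (fun k => decide (c k = m)) ≠ [] := by
    intro h
    have : k0 ∈ S.filter (fun k => decide (c k = m)) := List.mem_filter.mpr ⟨hk0S, by simp [hk0]⟩
    simp [h] at this
  obtain ⟨r1, hr1⟩ : ∃ r1, PySem.List.min? (pvListIdA arr) (fun x => x) = some r1 := by
    cases hmn : PySem.List.min? (pvListIdA arr) (fun x => x) with
    | none => rw [PySem.List.min?_eq_none_iff, hlist] at hmn; exact absurd hmn hLne
    | some r1 => exact ⟨r1, rfl⟩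
  have hr1mem := PySem.List.min?_mem hr1
  have hr1min := PySem.List.min?_isMin hr1
  rw [hlist] at hr1mem hr1min
  obtain ⟨hr1S, hr1cnt⟩ := List.mem_filter.mp hr1mem
  have hr1m : c r1 = m := by simpa using hr1cnt
  -- B's result r2
  obtain ⟨x1, t1, hS1⟩ := List.exists_cons_of_ne_nil hSne
  obtain ⟨r2, hr2⟩ : ∃ r2, S.foldl (pvMStep c) none = some r2 := by
    rw [hS1, List.foldl_cons, show pvMStep c none x1 = some x1 from rfl]
    exact pvMStep_some c t1 x1
  have hinv := pvMStep_inv c t1 x1 r2 (by rw [hS1, List.foldl_cons] at hr2; exact hr2)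
  obtain ⟨hr2mem, hr2x1, hr2all⟩ := hinv
  have hr2S : r2 ∈ S := by
    rw [hS1]; rcases hr2mem with h | h <;> simp [h]
  have hr2spec : ∀ y ∈ S, c y ≤ c r2 ∧ (c y = c r2 → r2 ≤ y) := by
    intro y hy
    rw [hS1] at hy
    rcases List.mem_cons.mp hy with h | h
    · subst h; exact hr2x1
    · exact hr2all y h
  -- c r2 = m, hence r2 is in A's candidate list and r1 ≤ r2
  have hr2m : c r2 = m := le_antisymm (hmmax r2 hr2S) (hk0 ▸ (hr2spec k0 hk0S).1)
  have h12 : r1 ≤ r2 := by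
    have : r2 ∈ S.filter (fun k => decide (c k = m)) := List.mem_filter.mpr ⟨hr2S, by simp [hr2m]⟩
    simpa using hr1min r2 this
  have h21 : r2 ≤ r1 := (hr2spec r1 hr1S).2 (by omega)
  -- both ports return their getD of the same some
  rw [migratoryBirds, migratoryBirds_alt, hr1, pvMin2_eq_foldl, ← hS, hr2]
  simp
  omega

-- ===== VERDICT (by name: the statement is the Claim_ definition above) =====
theorem migratoryBirds_spec : Claim_equal_migratoryBirds := by
  intro arr _ hpre
  exact migratoryBirds_spec' arr hpre
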